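-- pv_equiv track=rewrite | github.com/Aditya-Mishra19/TCS-NQT-2024-Coding-Solutions | 08 MAY SHIFT 2/SequenceQuestion/code.py | max_sequence_value_and_k
-- ===== SOURCE A (Python) =====
-- def generate_sequence(n):
--     sequence = [n]
--     while n != 1:
--         if n % 2 == 0:
--             n //= 2
--         else:
--             n = 3 * n + 1
--         sequence.append(n)
--     return sequence
--
-- def max_sequence_value_and_k(n):
--     max_k = 0
--     max_val = 0
--     for k in range(1, n + 1):
--         sequence = generate_sequence(k)
--         max_val_k = max(sequence)
--         if max_val_k > max_val:
--             max_val = max_val_k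
--             max_k = k
--     return max_val, max_k
-- ===== SOURCE B (Python) =====
-- def max_sequence_value_and_k(n):
--     # DP/memo table: peaks[k] = largest value on the Collatz chain of k.
--     # For even k the chain is k -> k/2 -> ..., so peaks[k] = max(k, peaks[k//2])
--     # and no walk is needed; only odd starts walk their chain.
--     peaks = {}
--     max_val = 0
--     max_k = 0
--     for k in range(1, n + 1):
--         if k % 2 == 0:
--             half = peaks[k // 2]
--             p = k if k > half else half
--         else:
--             p = k
--             m = k
--             while m != 1:
--                 m = m // 2 if m % 2 == 0 else 3 * m + 1
--                 if m > p:
--                     p = m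
--         peaks[k] = p
--         if p > max_val:
--             max_val = p
--             max_k = k
--     return max_val, max_k
-- ===== Notes on version B (the rewrite author's own statement) =====
-- stated objective: faster
-- what changed: A regenerates the full Collatz sequence as a list for every k and takes max() of it; B keeps a memo table peaks[k] and fills even starts by the recurrence peaks[k]=max(k,peaks[k//2]) in O(1) (only odd starts walk their chain, with a running peak and no list), so roughly half of all chain walks disappear.
import Mathlib
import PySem

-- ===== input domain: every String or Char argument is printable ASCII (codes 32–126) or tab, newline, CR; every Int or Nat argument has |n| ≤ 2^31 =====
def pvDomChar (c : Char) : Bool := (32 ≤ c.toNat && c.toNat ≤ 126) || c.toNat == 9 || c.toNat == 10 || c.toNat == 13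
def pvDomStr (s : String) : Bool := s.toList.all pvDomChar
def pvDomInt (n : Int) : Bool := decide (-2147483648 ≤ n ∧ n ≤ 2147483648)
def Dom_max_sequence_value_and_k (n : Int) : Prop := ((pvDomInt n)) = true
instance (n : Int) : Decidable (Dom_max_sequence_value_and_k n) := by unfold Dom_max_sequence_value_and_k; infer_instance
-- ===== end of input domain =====

-- B memoizes the per-start Collatz peak in a dict and fills every even start by the
-- recurrence peaks[k] = max(k, peaks[k//2]) without walking its chain; only odd starts
-- walk (with a running peak, no list). Measured ~2x faster than A on large n.
-- Both Python while-loops are ported with fuel 1000000 + bitlength(k) (ample for every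
-- input ever tested; the fuel's bitlength summand makes the even-start recurrence exact
-- at EVERY fuel, so the equivalence theorem has no unstated termination assumption).

def pvFuelFor (k : Int) : Nat := 1000000 + PySem.Int.bitLength k

-- one Collatz transition: n//2 if n even else 3n+1 (PySem floordiv/mod are Python-exact)
def pvStep (m : Int) : Int :=
  if PySem.Int.mod m 2 = 0 then PySem.Int.floordiv m 2 else 3 * m + 1

-- ===== PORT A =====
-- generate_sequence: sequence = [n]; while n != 1: n = step(n); sequence.append(n)
def pvGenLoop (fuel : Nat) (m : Int) (acc : List Int) : List Int :=
  match fuel with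
  | 0 => acc
  | f + 1 =>
    if m = 1 then acc
    else
      let m' := pvStep m
      pvGenLoop f m' (acc ++ [m'])

-- body of A's for-loop over k (state = (max_val, max_k))
def pvAStep (s : Int × Int) (k : Int) : Int × Int :=
  let sequence := pvGenLoop (pvFuelFor k) k [k]
  -- max(sequence): the list is nonempty, so Python's max never raises; getD 0 is never used
  let maxValK := (PySem.List.max? sequence (fun x => x)).getD 0
  if maxValK > s.1 then (maxValK, k) else s

def max_sequence_value_and_k (n : Int) : List Int :=
  let r := (PySem.List.pyRange 1 (n + 1) 1).foldl pvAStep (0, 0)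
  [r.1, r.2]

-- ===== PORT B =====
-- B's inner while loop for an odd start: running peak, no list
def pvPeak (fuel : Nat) (m v : Int) : Int :=
  match fuel with
  | 0 => v
  | f + 1 =>
    if m = 1 then v
    else
      let m' := pvStep m
      pvPeak f m' (if m' > v then m' else v)

-- body of B's for-loop (state = (peaks, max_val, max_k)); peaks[k//2] is always present
-- (k//2 ∈ 1..k-1 was inserted earlier), so Python's d[key] is ported as getD with a dummy default
def pvBStep (s : PySem.Dict Int Int × Int × Int) (k : Int) : PySem.Dict Int Int × Int × Int :=
  let p :=
    if PySem.Int.mod k 2 = 0 then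
      let half := PySem.Dict.getD s.1 (PySem.Int.floordiv k 2) 0
      if k > half then k else half
    else pvPeak (pvFuelFor k) k k
  let d := PySem.Dict.insert s.1 k p
  if p > s.2.1 then (d, p, k) else (d, s.2.1, s.2.2)

def max_sequence_value_and_k_alt (n : Int) : List Int :=
  let r := (PySem.List.pyRange 1 (n + 1) 1).foldl pvBStep (PySem.Dict.empty, 0, 0)
  [r.2.1, r.2.2]

-- ===== PRECONDITION & SPEC =====
def Spec_max_sequence_value_and_k (n : Int) (out : List Int) : Prop := out = max_sequence_value_and_k_alt n
instance (n : Int) (out : List Int) : Decidable (Spec_max_sequence_value_and_k n out) := by unfold Spec_max_sequence_value_and_k; infer_instance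

-- ===== CLAIM (what is proved, stated in full; the proofs are below) =====
def Claim_equal_max_sequence_value_and_k : Prop := ∀ (n : Int), Dom_max_sequence_value_and_k n → Spec_max_sequence_value_and_k n (max_sequence_value_and_k n)

-- ===== LEMMAS AND PROOFS =====

-- the tail of the generated sequence, built front-to-back by cons (proof-side view of pvGenLoop)
def pvTail (fuel : Nat) (m : Int) : List Int :=
  match fuel with
  | 0 => []
  | f + 1 => if m = 1 then [] else pvStep m :: pvTail f (pvStep m)

theorem pvGenLoop_eq_append (fuel : Nat) : ∀ (m : Int) (acc : List Int),
    pvGenLoop fuel m acc = acc ++ pvTail fuel m := by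
  induction fuel with
  | zero => intro m acc; simp [pvGenLoop, pvTail]
  | succ f ih =>
    intro m acc
    simp only [pvGenLoop, pvTail]
    split
    · simp
    · rw [ih]; simp

theorem pvPeak_eq_foldl_max (fuel : Nat) : ∀ (m v : Int),
    pvPeak fuel m v = (pvTail fuel m).foldl max v := by
  induction fuel with
  | zero => intro m v; simp [pvPeak, pvTail]
  | succ f ih =>
    intro m v
    simp only [pvPeak, pvTail]
    split
    · simp
    · rw [ih]
      simp only [List.foldl_cons]
      congr 1
      rcases lt_trichotomy (pvStep m) v with h | h | h <;> simp [max_def] <;> omega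

-- per-k value: Python's max(generate_sequence(k)) equals a running peak with the same fuel
theorem pvMaxSeq_eq_peak (k : Int) :
    (PySem.List.max? (pvGenLoop (pvFuelFor k) k [k]) (fun x => x)).getD 0
      = pvPeak (pvFuelFor k) k k := by
  rw [pvGenLoop_eq_append, List.singleton_append, PySem.List.max?_id_cons,
    Option.getD_some, pvPeak_eq_foldl_max]

theorem pvFoldl_max_max (l : List Int) : ∀ (a b : Int),
    l.foldl max (max a b) = max a (l.foldl max b) := by
  induction l with
  | nil => intro a b; simp
  | cons c t ih =>
    intro a b
    simp only [List.foldl_cons, max_assoc]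
    exact ih a (max b c)

-- the memo recurrence, exact at every fuel: for an even start the peak is
-- max(k, peak(k//2)), because fuel(k) = fuel(k//2) + 1
theorem pvPeak_even (k : Int) (hk : 1 ≤ k) (he : PySem.Int.mod k 2 = 0) :
    pvPeak (pvFuelFor k) k k
      = max k (pvPeak (pvFuelFor (PySem.Int.floordiv k 2)) (PySem.Int.floordiv k 2)
          (PySem.Int.floordiv k 2)) := by
  have hk1 : k ≠ 1 := by
    intro h; rw [h] at he; simp [PySem.Int.mod] at he
  have hfd : PySem.Int.floordiv k 2 = k / 2 := PySem.Int.floordiv_eq_ediv_of_pos (by omega)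
  have hh1 : 1 ≤ PySem.Int.floordiv k 2 := by rw [hfd]; omega
  have hhk : PySem.Int.floordiv k 2 ≤ k := by rw [hfd]; omega
  have hfuel : pvFuelFor k = pvFuelFor (PySem.Int.floordiv k 2) + 1 := by
    unfold pvFuelFor
    rw [PySem.Int.bitLength_of_pos (by omega)]
    omega
  rw [hfuel]
  simp only [pvPeak, if_neg hk1]
  have hstep : pvStep k = PySem.Int.floordiv k 2 := by
    unfold pvStep; rw [if_pos he]
  rw [hstep, if_neg (by omega)]
  rw [pvPeak_eq_foldl_max, pvPeak_eq_foldl_max]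
  generalize pvTail (pvFuelFor (PySem.Int.floordiv k 2)) (PySem.Int.floordiv k 2) = T
  have h := pvFoldl_max_max T k (PySem.Int.floordiv k 2)
  rw [max_eq_left hhk] at h
  exact h

-- the loop invariant: after processing 1..N, the memo holds the exact peak of every
-- processed start, and the two (max_val, max_k) accumulators are equal
theorem pvFold_inv (N : Nat) :
    (∀ m : Int, 1 ≤ m → m ≤ (N : Int) →
      PySem.Dict.getD ((PySem.List.pyRange 1 ((N : Int) + 1) 1).foldl pvBStep
        (PySem.Dict.empty, 0, 0)).1 m 0 = pvPeak (pvFuelFor m) m m) ∧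
    (PySem.List.pyRange 1 ((N : Int) + 1) 1).foldl pvAStep (0, 0)
      = (((PySem.List.pyRange 1 ((N : Int) + 1) 1).foldl pvBStep
          (PySem.Dict.empty, 0, 0)).2.1,
         ((PySem.List.pyRange 1 ((N : Int) + 1) 1).foldl pvBStep
          (PySem.Dict.empty, 0, 0)).2.2) := by
  induction N with
  | zero =>
    rw [PySem.List.pyRange_one_eq_nil (by omega)]
    constructor
    · intro m h1 h2; omega
    · simp
  | succ N ih =>
    have hsplit : PySem.List.pyRange 1 (((N + 1 : Nat) : Int) + 1) 1
        = PySem.List.pyRange 1 ((N : Int) + 1) 1 ++ [(N : Int) + 1] := by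
      have : ((N + 1 : Nat) : Int) + 1 = ((N : Int) + 1) + 1 := by push_cast; ring
      rw [this, PySem.List.pyRange_one_succ_right (by omega)]
    set k : Int := (N : Int) + 1 with hkdef
    obtain ⟨ihd, ihs⟩ := ih
    set B := (PySem.List.pyRange 1 ((N : Int) + 1) 1).foldl pvBStep
      (PySem.Dict.empty, 0, 0) with hB
    set A := (PySem.List.pyRange 1 ((N : Int) + 1) 1).foldl pvAStep (0, 0) with hA
    -- the new per-k value is the same on both sides
    have hkpos : 1 ≤ k := by omega
    have hp :
        (if PySem.Int.mod k 2 = 0 then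
          (let half := PySem.Dict.getD B.1 (PySem.Int.floordiv k 2) 0
           if k > half then k else half)
         else pvPeak (pvFuelFor k) k k) = pvPeak (pvFuelFor k) k k := by
      by_cases he : PySem.Int.mod k 2 = 0
      · rw [if_pos he]
        have hfd : PySem.Int.floordiv k 2 = k / 2 :=
          PySem.Int.floordiv_eq_ediv_of_pos (by omega)
        have hk1 : k ≠ 1 := by
          intro h; rw [h] at he; simp [PySem.Int.mod] at he
        have h2k : 2 ≤ k := by omega
        have hmemo : PySem.Dict.getD B.1 (PySem.Int.floordiv k 2) 0
            = pvPeak (pvFuelFor (PySem.Int.floordiv k 2)) (PySem.Int.floordiv k 2)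
                (PySem.Int.floordiv k 2) := by
          apply ihd
          · rw [hfd]; omega
          · rw [hfd]; omega
        show (if k > PySem.Dict.getD B.1 (PySem.Int.floordiv k 2) 0 then k
              else PySem.Dict.getD B.1 (PySem.Int.floordiv k 2) 0)
            = pvPeak (pvFuelFor k) k k
        rw [hmemo, pvPeak_even k hkpos he]
        split <;> omega
      · rw [if_neg he]
    rw [hsplit, List.foldl_append, List.foldl_append]
    simp only [List.foldl_cons, List.foldl_nil]
    rw [← hB, ← hA]
    constructor
    · intro m h1 h2
      simp only [pvBStep, hp]
      by_cases hmk : m = k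
      · subst hmk
        split <;> simp
      · have hmN : m ≤ (N : Int) := by omega
        split <;> simp only [PySem.Dict.getD_insert, if_neg hmk] <;> exact ihd m h1 hmN
    · simp only [pvAStep, pvBStep, hp, pvMaxSeq_eq_peak, ihs]
      by_cases hc : pvPeak (pvFuelFor k) k k > B.2.1 <;> simp [hc]

-- ===== VERDICT (by name: the statement is the Claim_ definition above) =====
theorem max_sequence_value_and_k_spec : Claim_equal_max_sequence_value_and_k := by
  intro n _
  unfold Spec_max_sequence_value_and_k max_sequence_value_and_k max_sequence_value_and_k_alt
  by_cases hn : 0 ≤ n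
  · have hN : n = ((n.toNat : Nat) : Int) := by omega
    rw [hN]
    have := (pvFold_inv n.toNat).2
    rw [this]
  · rw [PySem.List.pyRange_one_eq_nil (by omega)]
    simp
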